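-- pv_equiv track=rewrite | github.com/SagarBiswas-MultiHAT/ChatAutomation-AI-Assistant | 03_bot.py | get_relevant_lines
-- ===== SOURCE A (Python) =====
-- def get_relevant_lines(chat_history: str) -> list[str]:
--   lines = [line.strip() for line in chat_history.splitlines() if line.strip()]
--   if not lines:
--     return []
--   cutoff_markers = (
--     "write to",
--     "type a message",
--     "message",
--     "aa",
--   )
--   last_cutoff = -1
--   for index, line in enumerate(lines):
--     lowered = line.lower()
--     if any(lowered.startswith(marker) for marker in cutoff_markers):
--       last_cutoff = index
--   if last_cutoff >= 0:
--     return lines[:last_cutoff]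
--   return lines
-- ===== SOURCE B (Python) =====
-- def get_relevant_lines(chat_history: str) -> list[str]:
--   lines = [line.strip() for line in chat_history.splitlines() if line.strip()]
--   cutoff_markers = (
--     "write to",
--     "type a message",
--     "message",
--     "aa",
--   )
--   # Segment the lines into chunks, each chunk ending with a cutoff-marker line;
--   # trailing lines after the last marker stay in `current` and are discarded.
--   chunks = []
--   current = []
--   for line in lines:
--     current.append(line)
--     if any(line.lower().startswith(marker) for marker in cutoff_markers):
--       chunks.append(current)
--       current = []
--   if not chunks:
--     return lines
--   flat = [l for chunk in chunks for l in chunk]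
--   return flat[:-1]  # everything up to (excluding) the last marker line
-- ===== Notes on version B (the rewrite author's own statement) =====
-- stated objective: alternative
-- what changed: Instead of tracking a last_cutoff index and slicing, B segments the lines into chunks that each end at a marker line (trailing non-marker lines are left unappended), then flattens the chunks and drops the final marker line; no index arithmetic or slicing by position is used.
import Mathlib
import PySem

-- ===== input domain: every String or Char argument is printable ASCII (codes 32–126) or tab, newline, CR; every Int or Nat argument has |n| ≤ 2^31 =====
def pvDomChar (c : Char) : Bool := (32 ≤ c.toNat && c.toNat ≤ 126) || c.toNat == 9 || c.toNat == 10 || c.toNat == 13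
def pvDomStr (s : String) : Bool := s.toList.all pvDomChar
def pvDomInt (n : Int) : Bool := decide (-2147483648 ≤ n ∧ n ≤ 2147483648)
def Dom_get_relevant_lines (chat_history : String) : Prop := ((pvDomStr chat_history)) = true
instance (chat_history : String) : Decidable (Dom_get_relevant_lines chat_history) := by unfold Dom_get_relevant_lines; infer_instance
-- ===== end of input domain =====

-- B replaces A's last-cutoff-index tracking + positional slice by a chunking pass: lines are
-- grouped into chunks each ending at a marker line, then the chunks are flattened and the final
-- marker line dropped (alternative decomposition, same cost).

-- ===== PORT A =====
-- shared helper: the cutoff-marker test 'any(lowered.startswith(marker) ...)'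
def pvIsCut (line : String) : Bool :=
  ["write to", "type a message", "message", "aa"].any
    (fun m => PySem.Str.startswith (PySem.Str.lower line) m)

def get_relevant_lines (chat_history : String) : List String :=
  let lines := ((PySem.Str.splitlines chat_history).map PySem.Str.strip).filter (fun s => s ≠ "")
  if lines = [] then []
  else
    let last_cutoff : Int :=
      (PySem.List.enumerate lines 0).foldl
        (fun acc p => if pvIsCut p.2 then p.1 else acc) (-1)
    if 0 ≤ last_cutoff then PySem.List.slice lines none (some last_cutoff) else lines

-- ===== PORT B =====
-- the chunking loop: state = (completed chunks, current chunk)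
def pvChunkStep (st : List (List String) × List String) (line : String) :
    List (List String) × List String :=
  let cur := st.2 ++ [line]
  if pvIsCut line then (st.1 ++ [cur], []) else (st.1, cur)

def get_relevant_lines_alt (chat_history : String) : List String :=
  let lines := ((PySem.Str.splitlines chat_history).map PySem.Str.strip).filter (fun s => s ≠ "")
  let st := lines.foldl pvChunkStep ([], [])
  if st.1 = [] then lines
  else
    let flat := st.1.flatten
    flat.dropLast  -- flat[:-1]; exact: Python's xs[:-1] drops the last element ([] for empty xs)

-- ===== PRECONDITION & SPEC =====
def Spec_get_relevant_lines (chat_history : String) (out : List String) : Prop := out = get_relevant_lines_alt chat_history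
instance (chat_history : String) (out : List String) : Decidable (Spec_get_relevant_lines chat_history out) := by unfold Spec_get_relevant_lines; infer_instance

-- ===== CLAIM (what is proved, stated in full; the proofs are below) =====
def Claim_equal_get_relevant_lines : Prop := ∀ (chat_history : String), Dom_get_relevant_lines chat_history → Spec_get_relevant_lines chat_history (get_relevant_lines chat_history)

-- ===== LEMMAS AND PROOFS =====

-- joint invariant of A's enumerate-foldl and B's chunking foldl:
-- the chunks flattened form the prefix of `lines` ending at the last marker line,
-- A's last_cutoff equals (length of that prefix) - 1, and every chunk is nonempty.
lemma pvChunk_invariant (lines : List String) :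
    (lines.foldl pvChunkStep ([], [])).1.flatten ++ (lines.foldl pvChunkStep ([], [])).2 = lines
    ∧ (PySem.List.enumerate lines 0).foldl
        (fun acc p => if pvIsCut p.2 then p.1 else acc) (-1 : Int)
      = ((lines.foldl pvChunkStep ([], [])).1.flatten.length : Int) - 1
    ∧ (∀ c ∈ (lines.foldl pvChunkStep ([], [])).1, c ≠ []) := by
  induction lines using List.reverseRecOn with
  | nil => simp
  | append_singleton l x ih =>
    obtain ⟨h1, h2, h3⟩ := ih
    rw [PySem.List.enumerate_append, List.foldl_append, List.foldl_append]
    simp only [List.foldl_cons, List.foldl_nil, PySem.List.enumerate, pvChunkStep]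
    by_cases hc : pvIsCut x
    · simp only [hc, if_true]
      refine ⟨?_, ?_, ?_⟩
      · simp only [List.flatten_append, List.flatten_cons, List.flatten_nil,
          List.append_nil]
        rw [← List.append_assoc, h1]
      · -- A's new fold value is l.length (the marker index); flatten grew by cur ++ [x]
        have hlen : l.length = (l.foldl pvChunkStep ([], [])).1.flatten.length
            + (l.foldl pvChunkStep ([], [])).2.length := by
          have := congrArg List.length h1
          simpa using this.symm
        simp only [List.flatten_append, List.flatten_cons, List.flatten_nil,
          List.append_nil, List.length_append, List.length_cons, List.length_nil]
        push_cast
        omega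
      · intro c hc'
        rcases List.mem_append.mp hc' with h | h
        · exact h3 c h
        · simp only [List.mem_singleton] at h
          subst h; simp
    · simp only [Bool.not_eq_true] at hc
      simp only [hc, Bool.false_eq_true, if_false]
      refine ⟨?_, h2, h3⟩
      rw [← List.append_assoc, h1]

-- the two bodies agree for every post-filter line list
lemma pvMain (lines : List String) :
    (if lines = [] then []
     else
       let last_cutoff : Int :=
         (PySem.List.enumerate lines 0).foldl
           (fun acc p => if pvIsCut p.2 then p.1 else acc) (-1)
       if 0 ≤ last_cutoff then PySem.List.slice lines none (some last_cutoff) else lines)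
    = (let st := lines.foldl pvChunkStep ([], [])
       if st.1 = [] then lines else st.1.flatten.dropLast) := by
  obtain ⟨h1, h2, h3⟩ := pvChunk_invariant lines
  rcases hE : lines.foldl pvChunkStep ([], []) with ⟨C, cur⟩
  rw [hE] at h1 h2 h3
  dsimp only at h1 h2 h3
  simp only [hE]
  rcases C with _ | ⟨c, cs⟩
  · -- no marker: A's last_cutoff = -1, both sides return lines
    simp only [List.flatten_nil, List.length_nil] at h2
    by_cases hnil : lines = [] <;> simp [hnil, h2]
  · -- some marker: flatten nonempty, A slices at length - 1 = B's dropLast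
    have hcne : c ≠ [] := h3 c (List.mem_cons_self ..)
    have hflatne : ((c :: cs).flatten) ≠ [] := by
      rw [List.flatten_cons]
      simp [hcne]
    have hlen : 1 ≤ (c :: cs).flatten.length := List.length_pos_iff.mpr hflatne
    have hnil : lines ≠ [] := by
      intro h
      rw [h] at h1
      exact hflatne (List.append_eq_nil_iff.mp h1).1
    simp only [hnil, if_false, reduceCtorEq, h2]
    have h0 : (0 : Int) ≤ ((c :: cs).flatten.length : Int) - 1 := by omega
    rw [if_pos h0]
    have hcast : ((c :: cs).flatten.length : Int) - 1
        = (((c :: cs).flatten.length - 1 : Nat) : Int) := by omega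
    rw [hcast, PySem.List.slice_to_natCast, ← h1, List.dropLast_eq_take,
      List.take_append_of_le_length (by omega)]

-- ===== VERDICT (by name: the statement is the Claim_ definition above) =====
theorem get_relevant_lines_spec : Claim_equal_get_relevant_lines := by
  intro ch _
  unfold Spec_get_relevant_lines get_relevant_lines get_relevant_lines_alt
  exact pvMain _
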